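-- pv_equiv track=rewrite | github.com/y0zrin/TeamsDownloader | app/utils/student_selector.py | select_class_code_for_student
-- ===== SOURCE A (Python) =====
-- from typing import List, Dict, Optional
--
-- def select_class_code_for_student(
--     student_info_list: List[Dict],
--     class_name: str,
--     cached_selection: Optional[str] = None
-- ) -> Dict:
--     """複数クラス記号を持つ学生から適切なクラス記号を選択
--
--     Args:
--         student_info_list: 学生情報のリスト（複数クラス記号）
--         class_name: 現在のクラス名
--         cached_selection: キャッシュされた選択
--
--     Returns:
--         選択された学生情報
--     """
--     # 1. キャッシュされた選択があればそれを使用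
--     if cached_selection:
--         for item in student_info_list:
--             if item.get('class_code') == cached_selection:
--                 return item
--
--     # 2. クラス名と一致するクラス記号を探す
--     class_name_parts = set(class_name.split('-'))
--     for item in student_info_list:
--         code = item.get('class_code', '')
--         if code in class_name_parts:
--             return item
--
--     # 3. デフォルトは最初のクラス記号
--     return student_info_list[0]
-- ===== SOURCE B (Python) =====
-- def select_class_code_for_student(student_info_list, class_name, cached_selection=None):
--     parts = set(class_name.split('-'))
--     cached_hit = None
--     name_hit = None
--     for item in student_info_list:
--         if cached_hit is None and cached_selection and item.get('class_code') == cached_selection: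
--             cached_hit = item
--         if name_hit is None and item.get('class_code', '') in parts:
--             name_hit = item
--     if cached_hit is not None:
--         return cached_hit
--     if name_hit is not None:
--         return name_hit
--     return student_info_list[0]
-- ===== Notes on version B (the rewrite author's own statement) =====
-- stated objective: alternative
-- what changed: Replaces A's two sequential early-returning scans (cached-selection scan, then class-name-parts scan) by a single traversal that records the first cached hit and the first name hit and resolves the priority after the loop; the split set is computed once up front.
-- outside the precondition, e.g. on select_class_code_for_student([], 'A-B', 'A'): A raises IndexError, B raises IndexError
import Mathlib
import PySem

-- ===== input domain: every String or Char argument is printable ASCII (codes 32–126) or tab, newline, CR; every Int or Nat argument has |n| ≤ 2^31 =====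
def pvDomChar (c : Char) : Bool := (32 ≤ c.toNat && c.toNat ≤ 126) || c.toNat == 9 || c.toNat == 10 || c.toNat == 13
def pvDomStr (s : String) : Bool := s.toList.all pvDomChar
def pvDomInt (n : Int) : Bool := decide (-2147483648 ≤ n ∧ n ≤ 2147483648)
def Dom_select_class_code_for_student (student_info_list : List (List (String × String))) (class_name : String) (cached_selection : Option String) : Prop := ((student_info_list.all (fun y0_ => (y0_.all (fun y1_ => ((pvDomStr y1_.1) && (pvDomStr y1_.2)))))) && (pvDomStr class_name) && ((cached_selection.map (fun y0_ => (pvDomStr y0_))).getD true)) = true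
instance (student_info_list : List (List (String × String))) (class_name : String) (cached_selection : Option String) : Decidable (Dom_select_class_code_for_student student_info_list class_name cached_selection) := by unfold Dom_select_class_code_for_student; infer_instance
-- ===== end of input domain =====

-- B does one pass recording the first cached hit and the first name hit instead of A's two
-- sequential early-returning scans; same cost, different traversal structure (objective: alternative).

-- item.get('class_code') on an association-list dict: value of the first matching key
def pvGetCC (item : List (String × String)) : Option String :=
  (item.find? (fun p => p.1 == "class_code")).map (·.2)

-- ===== PORT A =====
-- loop 1 of A: first item whose class_code equals the cached selection
def pvScanCached (l : List (List (String × String))) (s : String) : Option (List (String × String)) :=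
  match l with
  | [] => none
  | item :: rest => if pvGetCC item = some s then some item else pvScanCached rest s

-- loop 2 of A: first item whose class_code (default '') is in the split set
def pvScanName (l : List (List (String × String))) (parts : PySem.Set String) : Option (List (String × String)) :=
  match l with
  | [] => none
  | item :: rest => if PySem.Set.contains parts ((pvGetCC item).getD "") then some item else pvScanName rest parts

def select_class_code_for_student (student_info_list : List (List (String × String))) (class_name : String) (cached_selection : Option String) : List (String × String) :=
  let cachedRes : Option (List (String × String)) :=
    match cached_selection with
    | some s => if s = "" then none else pvScanCached student_info_list s
    | none => none
  match cachedRes with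
  | some item => item
  | none =>
    let parts := PySem.Set.ofList ((PySem.Str.split? class_name "-").getD [])
    match pvScanName student_info_list parts with
    | some item => item
    | none => student_info_list.headD []   -- Python raises IndexError here on []; excluded by Pre_

-- ===== PORT B =====
-- single pass maintaining the first cached hit and the first name hit
def pvLoopB (key : Option String) (parts : PySem.Set String) :
    List (List (String × String)) → Option (List (String × String)) → Option (List (String × String)) →
    Option (List (String × String)) × Option (List (String × String))
  | [], ch, nh => (ch, nh)
  | item :: rest, ch, nh =>
    let ch' := match key with
      | some s => if ch = none ∧ pvGetCC item = some s then some item else ch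
      | none => ch
    let nh' := if nh = none ∧ PySem.Set.contains parts ((pvGetCC item).getD "") then some item else nh
    pvLoopB key parts rest ch' nh'

def select_class_code_for_student_alt (student_info_list : List (List (String × String))) (class_name : String) (cached_selection : Option String) : List (String × String) :=
  let parts := PySem.Set.ofList ((PySem.Str.split? class_name "-").getD [])
  let key : Option String := match cached_selection with
    | some s => if s = "" then none else some s
    | none => none
  match pvLoopB key parts student_info_list none none with
  | (some item, _) => item
  | (none, some item) => item
  | (none, none) => student_info_list.headD []   -- same IndexError spot; excluded by Pre_

-- ===== PRECONDITION & SPEC =====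
-- Pre_ excludes only the empty list, on which both Pythons raise IndexError at student_info_list[0].
def Pre_select_class_code_for_student (student_info_list : List (List (String × String))) (class_name : String) (cached_selection : Option String) : Prop :=
  student_info_list ≠ []
instance (student_info_list : List (List (String × String))) (class_name : String) (cached_selection : Option String) : Decidable (Pre_select_class_code_for_student student_info_list class_name cached_selection) := by unfold Pre_select_class_code_for_student; infer_instance

def pvWitness_select_class_code_for_student : (List (List (String × String))) × String × Option String :=
  ([[("class_code", "A")], [("class_code", "B")]], "A-B", some "B")

def Spec_select_class_code_for_student (student_info_list : List (List (String × String))) (class_name : String) (cached_selection : Option String) (out : List (String × String)) : Prop := out = select_class_code_for_student_alt student_info_list class_name cached_selection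
instance (student_info_list : List (List (String × String))) (class_name : String) (cached_selection : Option String) (out : List (String × String)) : Decidable (Spec_select_class_code_for_student student_info_list class_name cached_selection out) := by unfold Spec_select_class_code_for_student; infer_instance

-- ===== CLAIM (what is proved, stated in full; the proofs are below) =====
def Claim_equal_select_class_code_for_student : Prop := ∀ (student_info_list : List (List (String × String))) (class_name : String) (cached_selection : Option String), Dom_select_class_code_for_student student_info_list class_name cached_selection → Pre_select_class_code_for_student student_info_list class_name cached_selection → Spec_select_class_code_for_student student_info_list class_name cached_selection (select_class_code_for_student student_info_list class_name cached_selection)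

-- ===== LEMMAS AND PROOFS =====
-- A's first scan, restricted to an active key (none = falsy cached_selection: no scan)
def pvKeyScan (key : Option String) (l : List (List (String × String))) : Option (List (String × String)) :=
  match key with
  | some s => pvScanCached l s
  | none => none

-- the single pass computes exactly (first cached hit after ch, first name hit after nh)
lemma pvLoopB_spec (key : Option String) (parts : PySem.Set String) :
    ∀ (l : List (List (String × String))) (ch nh : Option (List (String × String))),
      pvLoopB key parts l ch nh = (ch.or (pvKeyScan key l), nh.or (pvScanName l parts)) := by
  intro l
  induction l with
  | nil => intro ch nh; cases key <;> simp [pvLoopB, pvKeyScan, pvScanCached, pvScanName]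
  | cons item rest ih =>
    intro ch nh
    simp only [pvLoopB, ih]
    cases key <;> cases ch <;> cases nh <;>
      simp [pvKeyScan, pvScanCached, pvScanName] <;> split_ifs <;> simp_all

theorem select_class_code_for_student_spec_aux
    (student_info_list : List (List (String × String))) (class_name : String) (cached_selection : Option String) :
    select_class_code_for_student student_info_list class_name cached_selection
      = select_class_code_for_student_alt student_info_list class_name cached_selection := by
  unfold select_class_code_for_student select_class_code_for_student_alt
  simp only [pvLoopB_spec, Option.none_or]
  cases cached_selection with
  | none =>
    rcases h : pvScanName student_info_list (PySem.Set.ofList ((PySem.Str.split? class_name "-").getD [])) with _ | item <;>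
      simp [pvKeyScan, h]
  | some s =>
    by_cases hs : s = "" <;>
      simp only [hs, if_true, if_false, reduceIte, pvKeyScan] <;>
      [skip; rcases hc : pvScanCached student_info_list s with _ | item] <;>
      rcases h : pvScanName student_info_list (PySem.Set.ofList ((PySem.Str.split? class_name "-").getD [])) with _ | item2 <;>
      simp [pvKeyScan, hs, h]

-- ===== VERDICT (by name: the statement is the Claim_ definition above) =====
theorem select_class_code_for_student_spec : Claim_equal_select_class_code_for_student := by
  intro l cn cs _ _
  unfold Spec_select_class_code_for_student
  exact select_class_code_for_student_spec_aux l cn cs
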